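-- pv_equiv track=rewrite | github.com/YashB63/GFG-Daily-Questions | Day 762/Maximum number of zeroes/max_number.py | maxZero
-- ===== SOURCE A (Python) =====
-- def maxZero(arr):
--     maxZeros = 0
--     res = '-1'
--     for number in arr:
--         zeros = 0
--         for digit in number:
--             if digit == '0':
--                 zeros += 1
--         if maxZeros < zeros:
--             maxZeros = zeros
--             res = number
--         if maxZeros != 0:
--             if maxZeros == zeros:
--                 if len(res) == len(number) and res < number:
--                     res = number
--                 elif len(res) < len(number):
--                     res = number
--     return res
-- ===== SOURCE B (Python) =====
-- def maxZero(arr):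
--     counts = [n.count('0') for n in arr]
--     m = max(counts, default=0)
--     if m == 0:
--         return '-1'
--     return max((n for n in arr if n.count('0') == m), key=lambda n: (len(n), n))
-- ===== Notes on version B (the rewrite author's own statement) =====
-- stated objective: simpler
-- what changed: A's single interleaved scan that threads a (maxZeros, res) state with nested tie-break branches is replaced by a two-phase decomposition: first compute the maximum zero-count over the list (default 0, returning '-1' if it is 0), then select among only the qualifying candidates the maximum under the key (length, string), which reproduces A's longer-then-lexicographically-larger tie-break with first-on-full-tie.
import Mathlib
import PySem

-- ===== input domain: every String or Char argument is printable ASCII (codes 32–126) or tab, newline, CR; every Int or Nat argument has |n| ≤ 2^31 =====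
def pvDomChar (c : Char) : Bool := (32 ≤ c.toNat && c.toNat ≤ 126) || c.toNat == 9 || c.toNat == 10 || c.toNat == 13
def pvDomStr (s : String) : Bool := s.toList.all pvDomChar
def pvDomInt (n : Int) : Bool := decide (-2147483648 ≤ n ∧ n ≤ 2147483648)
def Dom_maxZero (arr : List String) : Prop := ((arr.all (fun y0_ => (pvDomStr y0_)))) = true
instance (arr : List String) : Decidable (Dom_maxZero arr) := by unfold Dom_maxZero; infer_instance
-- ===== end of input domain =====

-- B replaces A's single interleaved (maxZeros, res) scan by a two-phase decomposition
-- (compute the max zero-count, then pick the (len, lex)-max among the candidates); objective: simpler.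

-- ===== PORT A =====
-- loop body of A's single scan, as a named fold step
def maxZeroStep (st : Int × String) (number : String) : Int × String :=
  let zeros : Int := number.toList.foldl (fun z digit => if digit == '0' then z + 1 else z) 0
  let st1 := if st.1 < zeros then (zeros, number) else st
  if st1.1 ≠ 0 then
    if st1.1 = zeros then
      if PySem.Str.len st1.2 = PySem.Str.len number ∧ st1.2 < number then (st1.1, number)
      else if PySem.Str.len st1.2 < PySem.Str.len number then (st1.1, number)
      else st1
    else st1
  else st1

def maxZero (arr : List String) : String :=
  (arr.foldl maxZeroStep ((0 : Int), "-1")).2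

-- ===== PORT B =====
def maxZero_alt (arr : List String) : String :=
  let counts := arr.map (fun n => PySem.Str.count n "0")
  let m := PySem.List.maxD counts (fun x => x) 0
  if m = 0 then "-1"
  else
    ((PySem.List.max2? (arr.filter (fun n => PySem.Str.count n "0" == m))
        (fun n => PySem.Str.len n) (fun n => n)).getD "-1")

-- ===== PRECONDITION & SPEC =====
def Spec_maxZero (arr : List String) (out : String) : Prop := out = maxZero_alt arr
instance (arr : List String) (out : String) : Decidable (Spec_maxZero arr out) := by unfold Spec_maxZero; infer_instance

-- ===== CLAIM (what is proved, stated in full; the proofs are below) =====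
def Claim_equal_maxZero : Prop := ∀ (arr : List String), Dom_maxZero arr → Spec_maxZero arr (maxZero arr)

-- ===== LEMMAS AND PROOFS =====

-- number of '0' characters in a string (proof-side abbreviation)
def cntZ (n : String) : ℕ := n.toList.count '0'

-- A's tie-break: replace r by n iff n is (len, lex)-strictly greater
def pick (r n : String) : String :=
  if (PySem.Str.len r = PySem.Str.len n ∧ r < n) ∨ PySem.Str.len r < PySem.Str.len n then n else r

def pickO (o : Option String) (n : String) : Option String :=
  match o with
  | none => some n
  | some r => some (pick r n)

-- A's scan, restated on the Nat side
def runA : List String → ℕ → String → ℕ × String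
  | [], m, r => (m, r)
  | x :: xs, m, r =>
      if m < cntZ x then runA xs (cntZ x) x
      else if cntZ x = m ∧ m ≠ 0 then runA xs m (pick r x)
      else runA xs m r

def MZ (xs : List String) : ℕ := (xs.map cntZ).foldl max 0

-- PySem.Chars.count with a single-character needle is List.count
lemma count_go_single (c : Char) : ∀ (fuel : ℕ) (l : List Char) (acc : ℕ), l.length ≤ fuel →
    PySem.Chars.count.go [c] fuel l acc = acc + l.count c := by
  intro fuel
  induction fuel with
  | zero =>
    intro l acc h
    have : l = [] := List.length_eq_zero_iff.mp (Nat.le_zero.mp h)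
    subst this
    simp [PySem.Chars.count.go]
  | succ f ih =>
    intro l acc h
    cases l with
    | nil => simp [PySem.Chars.count.go]
    | cons hd t =>
      rw [PySem.Chars.count.go]
      by_cases hc : hd = c
      · subst hc
        simp only [List.isPrefixOf, BEq.rfl, Bool.and_eq_true, and_true]
        simp only [if_pos]
        · rw [ih]
          · simp [List.count_cons]
            omega
          · simpa using Nat.le_of_succ_le_succ h
      · have : ¬ ([c].isPrefixOf (hd :: t) = true) := by
          simp [List.isPrefixOf]
          exact fun hh => (hc hh.symm).elim
        rw [if_neg this, ih t acc (by simpa using Nat.le_of_succ_le_succ h)]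
        simp [hc]

lemma str_count_single (n : String) : PySem.Str.count n "0" = cntZ n := by
  rw [PySem.Str.count]
  show PySem.Chars.count n.toList ['0'] = _
  rw [PySem.Chars.count]
  rw [if_neg (by simp)]
  simpa [cntZ] using count_go_single '0' n.toList.length n.toList 0 le_rfl

lemma step_eq (m : ℕ) (r n : String) : maxZeroStep ((m : Int), r) n =
    if m < cntZ n then ((cntZ n : Int), n)
    else if cntZ n = m ∧ m ≠ 0 then ((m : Int), pick r n)
    else ((m : Int), r) := by
  unfold maxZeroStep
  have hz : n.toList.foldl (fun z digit => if digit == '0' then z + 1 else z) (0 : Int)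
      = (cntZ n : Int) := by
    rw [PySem.List.foldl_beq_add_one]
    simp [cntZ]
  rw [hz]
  dsimp only
  by_cases h1 : (m : Int) < (cntZ n : Int)
  · have hm1 : m < cntZ n := by exact_mod_cast h1
    have hne : (cntZ n : Int) ≠ 0 := by
      have : 0 < cntZ n := by omega
      exact_mod_cast Nat.pos_iff_ne_zero.mp this
    simp only [if_pos h1, if_pos hm1, ne_eq, hne, not_false_iff, if_true, if_pos rfl]
    split_ifs <;> rfl
  · have hm1 : ¬ m < cntZ n := fun h => h1 (by exact_mod_cast h)
    rw [if_neg h1, if_neg hm1]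
    by_cases h2 : cntZ n = m ∧ m ≠ 0
    · have hmne : (m : Int) ≠ 0 := by exact_mod_cast h2.2
      have heq : (m : Int) = (cntZ n : Int) := by exact_mod_cast h2.1.symm
      rw [if_pos h2]
      simp only [ne_eq, hmne, not_false_iff, if_true, if_pos heq]
      unfold pick
      split_ifs with hA hB hC <;> first | rfl | (exfalso; tauto)
    · rw [if_neg h2]
      by_cases hm0 : (m : Int) = 0
      · simp [hm0]
      · have : (m : Int) ≠ (cntZ n : Int) := by
          intro h
          exact h2 ⟨by exact_mod_cast h.symm, by exact_mod_cast hm0⟩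
        simp [hm0, this]

lemma foldA_eq_runA : ∀ (xs : List String) (m : ℕ) (r : String),
    xs.foldl maxZeroStep ((m : Int), r) = (((runA xs m r).1 : Int), (runA xs m r).2) := by
  intro xs
  induction xs with
  | nil => intro m r; rfl
  | cons x xs ih =>
    intro m r
    simp only [List.foldl_cons, runA]
    rw [step_eq]
    by_cases h1 : m < cntZ x
    · simp only [if_pos h1]
      exact ih (cntZ x) x
    · rw [if_neg h1, if_neg h1]
      by_cases h2 : cntZ x = m ∧ m ≠ 0
      · simp only [if_pos h2]
        exact ih m (pick r x)
      · simp only [if_neg h2]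
        exact ih m r

lemma foldl_max_shift (l : List ℕ) (a : ℕ) : l.foldl max a = max a (l.foldl max 0) := by
  induction l generalizing a with
  | nil => simp
  | cons b t ih =>
    simp only [List.foldl_cons]
    rw [ih (max a b), ih (max 0 b)]
    omega

lemma MZ_cons (x : String) (xs : List String) : MZ (x :: xs) = max (cntZ x) (MZ xs) := by
  unfold MZ
  simp only [List.map_cons, List.foldl_cons]
  rw [foldl_max_shift]
  omega

lemma MZ_attained (xs : List String) (h : MZ xs ≠ 0) :
    xs.filter (fun n => cntZ n = MZ xs) ≠ [] := by
  have hmem := PySem.List.foldl_max_mem (xs.map cntZ) 0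
  rcases hmem with h0 | hin
  · exact absurd h0 h
  · rw [List.mem_map] at hin
    obtain ⟨n, hn, hcnt⟩ := hin
    intro hfil
    rw [List.filter_eq_nil_iff] at hfil
    exact hfil n hn (by simp [MZ, hcnt])

lemma foldl_pickO_some (l : List String) : ∀ (r : String),
    l.foldl pickO (some r) = some (l.foldl pick r) := by
  induction l with
  | nil => intro r; rfl
  | cons x t ih =>
    intro r
    simp only [List.foldl_cons, pickO]
    exact ih (pick r x)

lemma foldl_pickO_ne_none (l : List String) (hl : l ≠ []) :
    ∃ v, l.foldl pickO none = some v := by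
  cases l with
  | nil => exact absurd rfl hl
  | cons x t =>
    refine ⟨t.foldl pick x, ?_⟩
    simp only [List.foldl_cons, pickO]
    exact foldl_pickO_some t x

lemma getD_congr (o : Option String) (h : o ≠ none) (d1 d2 : String) :
    o.getD d1 = o.getD d2 := by
  cases o with
  | none => exact absurd rfl h
  | some v => rfl

lemma runA_spec : ∀ (xs : List String) (m : ℕ) (r : String),
    runA xs m r = (max m (MZ xs),
      if max m (MZ xs) = 0 then r
      else ((xs.filter (fun n => cntZ n = max m (MZ xs))).foldl pickO
              (if m = max m (MZ xs) then some r else none)).getD r) := by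
  intro xs
  induction xs with
  | nil =>
    intro m r
    simp [runA, MZ]
  | cons x xs ih =>
    intro m r
    rw [MZ_cons]
    simp only [runA]
    by_cases h1 : m < cntZ x
    · rw [if_pos h1, ih]
      simp only [Prod.mk.injEq]
      refine ⟨by omega, ?_⟩
      have hKne : max m (max (cntZ x) (MZ xs)) ≠ 0 := by omega
      have hKne' : max (cntZ x) (MZ xs) ≠ 0 := by omega
      have hmne : ¬ m = max m (max (cntZ x) (MZ xs)) := by omega
      have hK : max (cntZ x) (MZ xs) = max m (max (cntZ x) (MZ xs)) := by omega
      rw [if_neg hKne, if_neg hKne', if_neg hmne, ← hK]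
      by_cases hx : cntZ x = max (cntZ x) (MZ xs)
      · rw [if_pos hx]
        rw [List.filter_cons_of_pos (by simp [← hx])]
        rw [List.foldl_cons]
        rw [show pickO none x = some x from rfl]
        rw [foldl_pickO_some]
        rfl
      · rw [if_neg hx]
        rw [List.filter_cons_of_neg (by simp [hx])]
        apply getD_congr
        have hMZx : max (cntZ x) (MZ xs) = MZ xs := by omega
        rw [hMZx]
        obtain ⟨v, hv⟩ := foldl_pickO_ne_none _ (MZ_attained xs (by omega))
        rw [hv]
        simp
    · rw [if_neg h1]
      by_cases h2 : cntZ x = m ∧ m ≠ 0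
      · rw [if_pos h2, ih]
        have hK : max m (max (cntZ x) (MZ xs)) = max m (MZ xs) := by omega
        simp only [Prod.mk.injEq]
        refine ⟨by omega, ?_⟩
        have hKne : max m (MZ xs) ≠ 0 := by omega
        rw [hK, if_neg hKne, if_neg hKne]
        by_cases hm : m = max m (MZ xs)
        · rw [if_pos hm, if_pos hm]
          rw [List.filter_cons_of_pos (by rw [h2.1, ← hm]; simp)]
          rw [List.foldl_cons]
          rw [show pickO (some r) x = some (pick r x) from rfl]
          rw [foldl_pickO_some]
          rfl
        · rw [if_neg hm, if_neg hm]
          rw [List.filter_cons_of_neg (by simp [h2.1]; omega)]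
          apply getD_congr
          have hMZx : max m (MZ xs) = MZ xs := by omega
          rw [hMZx]
          obtain ⟨v, hv⟩ := foldl_pickO_ne_none _ (MZ_attained xs (by omega))
          rw [hv]
          simp
      · rw [if_neg h2, ih]
        have hK : max m (max (cntZ x) (MZ xs)) = max m (MZ xs) := by omega
        simp only [Prod.mk.injEq]
        refine ⟨by omega, ?_⟩
        rw [hK]
        by_cases hK0 : max m (MZ xs) = 0
        · rw [if_pos hK0, if_pos hK0]
        · rw [if_neg hK0, if_neg hK0]
          have hpred : ¬ cntZ x = max m (MZ xs) := by
            intro h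
            have hcm : cntZ x = m := by omega
            exact h2 ⟨hcm, by omega⟩
          rw [List.filter_cons_of_neg (by simp [hpred])]

lemma max2_eq_foldl_pickO (l : List String) :
    PySem.List.max2? l (fun n => PySem.Str.len n) (fun n => n) = l.foldl pickO none := by
  show l.foldl _ none = l.foldl pickO none
  congr 1
  funext o x
  cases o with
  | none => rfl
  | some v =>
    show (if (decide (PySem.Str.len v < PySem.Str.len x)
            || (!decide (PySem.Str.len x < PySem.Str.len v) && decide (v < x))) = true
          then some x else some v) = some (pick v x)
    unfold pick
    simp only [Bool.or_eq_true, Bool.and_eq_true, Bool.not_eq_true', decide_eq_true_eq,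
      decide_eq_false_iff_not]
    split_ifs with hb hp1 hp2
    · rfl
    · exfalso
      rcases hb with hlt | ⟨hnl, hvx⟩
      · exact hp1 (Or.inr hlt)
      · have hnlt : ¬ PySem.Str.len v < PySem.Str.len x := fun h => hp1 (Or.inr h)
        exact hp1 (Or.inl ⟨by omega, hvx⟩)
    · exfalso
      have hnb1 : ¬ PySem.Str.len v < PySem.Str.len x := fun h => hb (Or.inl h)
      have hnb2 : ¬ (¬ PySem.Str.len x < PySem.Str.len v ∧ v < x) := fun h => hb (Or.inr h)
      rcases hp2 with ⟨heq, hvx⟩ | hlt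
      · exact hnb2 ⟨by omega, hvx⟩
      · exact hnb1 hlt
    · rfl

lemma alt_char (arr : List String) :
    maxZero_alt arr = if MZ arr = 0 then "-1"
      else ((arr.filter (fun n => cntZ n = MZ arr)).foldl pickO none).getD "-1" := by
  unfold maxZero_alt
  dsimp only
  have hmap : arr.map (fun n => PySem.Str.count n "0") = arr.map cntZ :=
    List.map_congr_left (fun n _ => str_count_single n)
  have hm : PySem.List.maxD (arr.map (fun n => PySem.Str.count n "0")) (fun x => x) 0
      = MZ arr := by
    rw [hmap]
    cases arr with
    | nil => rfl
    | cons a t =>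
      unfold PySem.List.maxD
      simp only [List.map_cons]
      rw [PySem.List.max?_id_cons]
      simp only [Option.getD_some]
      unfold MZ
      simp [Nat.zero_max]
  rw [hm]
  by_cases h0 : MZ arr = 0
  · simp [h0]
  · rw [if_neg h0, if_neg h0]
    rw [max2_eq_foldl_pickO]
    have hfil : arr.filter (fun n => PySem.Str.count n "0" == MZ arr)
        = arr.filter (fun n => cntZ n = MZ arr) := by
      apply List.filter_congr
      intro n _
      rw [str_count_single]
      by_cases hnm : cntZ n = MZ arr <;> simp [hnm]
    rw [hfil]

-- ===== VERDICT (by name: the statement is the Claim_ definition above) =====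
theorem maxZero_spec : Claim_equal_maxZero := by
  intro arr _
  unfold Spec_maxZero
  unfold maxZero
  have h := foldA_eq_runA arr 0 "-1"
  rw [show ((0 : ℕ) : Int) = (0 : Int) from rfl] at h
  rw [h, runA_spec, alt_char]
  simp only [Nat.zero_max]
  by_cases h0 : MZ arr = 0
  · simp [h0]
  · rw [if_neg h0, if_neg h0, if_neg (show ¬ (0 : ℕ) = MZ arr from fun hh => h0 hh.symm)]
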